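-- pv_equiv track=rewrite | github.com/popitsch/rnalib | rnalib/utils.py | longest_hp_gc_len
-- ===== SOURCE A (Python) =====
-- from collections import Counter, namedtuple, defaultdict
--
-- def longest_hp_gc_len(seq) -> (int, int):
--     """
--     Counts HP length (any allele) from start.
--     This method counts any character including N's
--     """
--     c = Counter()
--     last_char = None
--     for base in seq:
--         if last_char == base:  # hp continue
--             c["hp"] += 1
--         else:
--             if c["hp"] > c["longest_hp"]:
--                 c["longest_hp"] = c["hp"]
--             c["hp"] = 1
--         if base in ["G", "C"]:
--             c["gc"] += 1
--         else:
--             if c["gc"] > c["longest_gc"]: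
--                 c["longest_gc"] = c["gc"]
--             c["gc"] = 0
--         last_char = base
--     if c["hp"] > c["longest_hp"]:
--         c["longest_hp"] = c["hp"]
--     if c["gc"] > c["longest_gc"]:
--         c["longest_gc"] = c["gc"]
--     # get max base:return max(c, key=c.get)
--     return c["longest_hp"], c["longest_gc"]
-- ===== SOURCE B (Python) =====
-- def longest_hp_gc_len(seq) -> (int, int):
--     """Run-length-encoding decomposition: segment the sequence into maximal
--     runs (of equal characters, and of the GC/non-GC boolean stream) with a
--     two-pointer scan, then take the maxima over the run lengths."""
--     s = list(seq)
--     n = len(s)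
--     # run lengths of maximal blocks of consecutive equal characters
--     hp_runs = []
--     i = 0
--     while i < n:
--         j = i + 1
--         while j < n and s[j] == s[i]:
--             j += 1
--         hp_runs.append(j - i)
--         i = j
--     # run-length encode the boolean stream "is this base G or C?"
--     gc_runs = []
--     i = 0
--     while i < n:
--         k = s[i] in ("G", "C")
--         j = i + 1
--         while j < n and (s[j] in ("G", "C")) == k:
--             j += 1
--         gc_runs.append((k, j - i))
--         i = j
--     longest_hp = 0
--     for m in hp_runs:
--         if m > longest_hp:
--             longest_hp = m
--     longest_gc = 0
--     for k, m in gc_runs: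
--         if k and m > longest_gc:
--             longest_gc = m
--     return longest_hp, longest_gc
-- ===== Notes on version B (the rewrite author's own statement) =====
-- stated objective: alternative
-- what changed: A computes both answers in one online pass with running Counter cells updated at every character; B first materializes the sequence, run-length encodes it twice with a two-pointer scan (equal-character runs, and runs of the GC/non-GC boolean stream), then takes the maxima over the recorded run lengths; dropping A's per-character Counter lookups/updates gives a constant-factor speedup (measured ~2x).
import Mathlib
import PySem

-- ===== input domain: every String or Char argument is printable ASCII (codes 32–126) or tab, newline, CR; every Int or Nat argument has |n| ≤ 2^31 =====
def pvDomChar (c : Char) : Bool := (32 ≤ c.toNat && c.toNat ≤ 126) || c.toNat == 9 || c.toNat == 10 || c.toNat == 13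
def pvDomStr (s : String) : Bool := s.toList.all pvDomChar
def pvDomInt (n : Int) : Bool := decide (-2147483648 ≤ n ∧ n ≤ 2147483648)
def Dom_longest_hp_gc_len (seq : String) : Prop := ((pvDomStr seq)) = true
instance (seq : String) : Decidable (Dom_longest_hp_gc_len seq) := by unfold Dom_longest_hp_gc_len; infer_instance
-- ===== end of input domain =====

-- B re-implements A by a different decomposition (run-length encode first, then take maxima); same O(n) cost, objective: alternative.

-- ===== PORT A =====
-- A's Counter is read/written only at the four keys "hp"/"longest_hp"/"gc"/"longest_gc"
-- (Counter reads of missing keys return 0), so the state is ported as those four Ints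
-- plus last_char : Option Char; the loop body is transliterated branch for branch.
def pvAStep (st : Option Char × Int × Int × Int × Int) (base : Char) :
    Option Char × Int × Int × Int × Int :=
  let (last, hp, lhp, gc, lgc) := st
  let (hp, lhp) := if last == some base then (hp + 1, lhp)
                   else (1, if hp > lhp then hp else lhp)   -- update longest_hp with old hp, then hp := 1
  let (gc, lgc) := if base == 'G' || base == 'C' then (gc + 1, lgc)
                   else (0, if gc > lgc then gc else lgc)
  (some base, hp, lhp, gc, lgc)

def longest_hp_gc_len (seq : String) : Int × Int :=
  let c := seq.toList.foldl pvAStep (none, 0, 0, 0, 0)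
  let lhp := if c.2.1 > c.2.2.1 then c.2.1 else c.2.2.1
  let lgc := if c.2.2.2.1 > c.2.2.2.2 then c.2.2.2.1 else c.2.2.2.2
  (lhp, lgc)

-- ===== PORT B =====
def pvGC (c : Char) : Bool := c == 'G' || c == 'C'

-- inner `while j < n and <p>(s[j]): j += 1`
def pvScan (s : List Char) (n : Nat) (p : Char → Bool) (j : Nat) : Nat :=
  if j < n && p (s.getD j ' ') then pvScan s n p (j + 1) else j
termination_by n - j
decreasing_by
  rename_i h; simp at h; omega

theorem pvScan_ge (s : List Char) (n : Nat) (p : Char → Bool) (j : Nat) :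
    j ≤ pvScan s n p j := by
  induction j using pvScan.induct (s := s) (n := n) (p := p) with
  | case1 x h ih => rw [pvScan, if_pos h]; omega
  | case2 x h => rw [pvScan, if_neg h]


-- outer while over i: run lengths of maximal equal-character blocks
def pvRunsHP (s : List Char) (n i : Nat) : List Int :=
  if h : i < n then
    let j := pvScan s n (fun d => d == s.getD i ' ') (i + 1)
    ((j - i : Nat) : Int) :: pvRunsHP s n j
  else []
termination_by n - i
decreasing_by
  have := pvScan_ge s n (fun d => d == s.getD i ' ') (i + 1); omega

-- outer while over i: run-length encoding of the GC/non-GC boolean stream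
def pvRunsGC (s : List Char) (n i : Nat) : List (Bool × Int) :=
  if h : i < n then
    let k := pvGC (s.getD i ' ')
    let j := pvScan s n (fun d => pvGC d == k) (i + 1)
    (k, ((j - i : Nat) : Int)) :: pvRunsGC s n j
  else []
termination_by n - i
decreasing_by
  have := pvScan_ge s n (fun d => pvGC d == pvGC (s.getD i ' ')) (i + 1); omega

def longest_hp_gc_len_alt (seq : String) : Int × Int :=
  let s := seq.toList
  let n := s.length
  let hpRuns := pvRunsHP s n 0
  let gcRuns := pvRunsGC s n 0
  let lhp := hpRuns.foldl (fun acc m => if m > acc then m else acc) 0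
  let lgc := gcRuns.foldl (fun acc km => if km.1 = true ∧ km.2 > acc then km.2 else acc) 0
  (lhp, lgc)

-- ===== PRECONDITION & SPEC =====
def Spec_longest_hp_gc_len (seq : String) (out : Int × Int) : Prop := out = longest_hp_gc_len_alt seq
instance (seq : String) (out : Int × Int) : Decidable (Spec_longest_hp_gc_len seq out) := by unfold Spec_longest_hp_gc_len; infer_instance

-- ===== CLAIM (what is proved, stated in full; the proofs are below) =====
def Claim_equal_longest_hp_gc_len : Prop := ∀ (seq : String), Dom_longest_hp_gc_len seq → Spec_longest_hp_gc_len seq (longest_hp_gc_len seq)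

-- ===== LEMMAS AND PROOFS =====

-- A's loop body acts componentwise: split the 5-tuple fold into an hp fold and a gc fold.
def pvHpStep (st : Option Char × Int × Int) (base : Char) : Option Char × Int × Int :=
  (some base, if st.1 == some base then st.2.1 + 1 else 1,
   if st.1 == some base then st.2.2 else if st.2.1 > st.2.2 then st.2.1 else st.2.2)

def pvGcStep (st : Int × Int) (base : Char) : Int × Int :=
  if pvGC base then (st.1 + 1, st.2) else (0, if st.1 > st.2 then st.1 else st.2)

theorem pv_fold_split (xs : List Char) (l0 : Option Char) (h0 lh0 g0 lg0 : Int) :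
    xs.foldl pvAStep (l0, h0, lh0, g0, lg0) =
      ((xs.foldl pvHpStep (l0, h0, lh0)).1,
       (xs.foldl pvHpStep (l0, h0, lh0)).2.1,
       (xs.foldl pvHpStep (l0, h0, lh0)).2.2,
       (xs.foldl pvGcStep (g0, lg0)).1,
       (xs.foldl pvGcStep (g0, lg0)).2) := by
  induction xs generalizing l0 h0 lh0 g0 lg0 with
  | nil => rfl
  | cons x xs ih =>
    simp only [List.foldl_cons, pvAStep, pvHpStep, pvGcStep, pvGC]
    split <;> split <;> simp_all

-- proof-side structural run machinery
def pvMaxRuns (c : Char) (hp : Int) : List Char → Int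
  | [] => hp
  | x :: xs => if x == c then pvMaxRuns c (hp + 1) xs else max hp (pvMaxRuns x 1 xs)

def pvGcM (gc : Int) : List Char → Int
  | [] => gc
  | x :: xs => if pvGC x then pvGcM (gc + 1) xs else max gc (pvGcM 0 xs)

def pvHpRunsL : List Char → List Int
  | [] => []
  | c :: rest =>
    (1 + ((rest.takeWhile (fun d => d == c)).length : Int)) ::
      pvHpRunsL (rest.dropWhile (fun d => d == c))
termination_by l => l.length
decreasing_by
  have := List.length_dropWhile_le (fun d => d == c) rest; simp; omega

def pvGcRunsL : List Char → List (Bool × Int)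
  | [] => []
  | c :: rest =>
    (pvGC c, 1 + ((rest.takeWhile (fun d => pvGC d == pvGC c)).length : Int)) ::
      pvGcRunsL (rest.dropWhile (fun d => pvGC d == pvGC c))
termination_by l => l.length
decreasing_by
  have := List.length_dropWhile_le (fun d => pvGC d == pvGC c) rest; simp; omega

def pvMaxL (l : List Int) : Int := l.foldl (fun acc m => if m > acc then m else acc) 0
def pvGcMaxL (rs : List (Bool × Int)) : Int :=
  rs.foldl (fun acc km => if km.1 = true ∧ km.2 > acc then km.2 else acc) 0

theorem pv_drop_takeWhile (l : List Char) (p : Char → Bool) :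
    l.drop (l.takeWhile p).length = l.dropWhile p := by
  have h : List.drop (l.takeWhile p).length (l.takeWhile p ++ l.dropWhile p) = l.dropWhile p :=
    List.drop_left
  rwa [List.takeWhile_append_dropWhile] at h

theorem pvScan_eq (s : List Char) (p : Char → Bool) (j : Nat) :
    pvScan s s.length p j = j + ((s.drop j).takeWhile p).length := by
  induction j using pvScan.induct (s := s) (n := s.length) (p := p) with
  | case1 x h ih =>
    rw [pvScan, if_pos h]
    simp only [Bool.and_eq_true, decide_eq_true_eq] at h
    obtain ⟨hx, hp⟩ := h
    rw [List.getD_eq_getElem s ' ' hx] at hp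
    rw [← List.getElem_cons_drop hx, List.takeWhile_cons, hp]
    simp only [if_true, List.length_cons]
    omega
  | case2 x h =>
    rw [pvScan, if_neg h]
    simp only [Bool.and_eq_true, decide_eq_true_eq, not_and] at h
    by_cases hx : x < s.length
    · have hp := h hx
      rw [List.getD_eq_getElem s ' ' hx] at hp
      rw [← List.getElem_cons_drop hx, List.takeWhile_cons]
      simp [hp]
    · rw [List.drop_eq_nil_of_le (by omega)]
      simp

theorem pvRunsHP_eq (s : List Char) (i : Nat) :
    pvRunsHP s s.length i = pvHpRunsL (s.drop i) := by
  induction i using pvRunsHP.induct (s := s) (n := s.length) with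
  | case1 i h j ih =>
    rw [pvRunsHP]
    simp only [dif_pos h]
    have hg : s.getD i ' ' = s[i] := List.getD_eq_getElem s ' ' h
    have hj : j = pvScan s s.length (fun d => d == s.getD i ' ') (i + 1) := rfl
    rw [hj] at ih
    simp only [hg] at ih ⊢
    have hscan := pvScan_eq s (fun d => d == s[i]) (i + 1)
    rw [← List.getElem_cons_drop h]
    simp only [pvHpRunsL]
    refine List.cons_eq_cons.mpr ⟨?_, ?_⟩
    · rw [hscan]
      push_cast
      omega
    · rw [ih, hscan, ← List.drop_drop, pv_drop_takeWhile]
  | case2 i h =>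
    rw [pvRunsHP, dif_neg h, List.drop_eq_nil_of_le (by omega)]
    simp [pvHpRunsL]

theorem pvRunsGC_eq (s : List Char) (i : Nat) :
    pvRunsGC s s.length i = pvGcRunsL (s.drop i) := by
  induction i using pvRunsGC.induct (s := s) (n := s.length) with
  | case1 i h k j ih =>
    rw [pvRunsGC]
    simp only [dif_pos h]
    have hg : s.getD i ' ' = s[i] := List.getD_eq_getElem s ' ' h
    have hk : k = pvGC (s.getD i ' ') := rfl
    have hj : j = pvScan s s.length (fun d => pvGC d == k) (i + 1) := rfl
    rw [hk] at hj
    rw [hj] at ih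
    simp only [hg] at ih ⊢
    have hscan := pvScan_eq s (fun d => pvGC d == pvGC s[i]) (i + 1)
    rw [← List.getElem_cons_drop h]
    simp only [pvGcRunsL]
    refine List.cons_eq_cons.mpr ⟨?_, ?_⟩
    · rw [hscan]
      refine Prod.ext rfl ?_
      push_cast
      omega
    · rw [ih, hscan, ← List.drop_drop, pv_drop_takeWhile]
  | case2 i h =>
    rw [pvRunsGC, dif_neg h, List.drop_eq_nil_of_le (by omega)]
    simp [pvGcRunsL]

theorem pv_foldmax_ge (l : List Int) (a : Int) :
    a ≤ l.foldl (fun acc m => if m > acc then m else acc) a := by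
  induction l generalizing a with
  | nil => simp
  | cons x xs ih =>
    simp only [List.foldl_cons]
    exact le_trans (by split <;> omega) (ih (if x > a then x else a))

theorem pv_gcfold_ge (rs : List (Bool × Int)) (a : Int) :
    a ≤ rs.foldl (fun acc km => if km.1 = true ∧ km.2 > acc then km.2 else acc) a := by
  induction rs generalizing a with
  | nil => simp
  | cons x xs ih =>
    simp only [List.foldl_cons]
    exact le_trans (by split <;> omega) (ih _)

theorem pv_foldmax_shift (l : List Int) (a : Int) (ha : 0 ≤ a) :
    l.foldl (fun acc m => if m > acc then m else acc) a
      = max a (l.foldl (fun acc m => if m > acc then m else acc) 0) := by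
  induction l generalizing a with
  | nil => simp only [List.foldl_nil]; omega
  | cons x xs ih =>
    simp only [List.foldl_cons]
    rw [ih (if x > a then x else a) (by split <;> omega),
        ih (if x > (0 : Int) then x else 0) (by split <;> omega)]
    split <;> split <;> omega

theorem pv_gcfold_shift (rs : List (Bool × Int)) (a : Int) (ha : 0 ≤ a) :
    rs.foldl (fun acc km => if km.1 = true ∧ km.2 > acc then km.2 else acc) a
      = max a (rs.foldl (fun acc km => if km.1 = true ∧ km.2 > acc then km.2 else acc) 0) := by
  induction rs generalizing a with
  | nil => simp only [List.foldl_nil]; omega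
  | cons x xs ih =>
    obtain ⟨k, m⟩ := x
    simp only [List.foldl_cons]
    rw [ih (if k = true ∧ m > a then m else a) (by split <;> omega),
        ih (if k = true ∧ m > (0 : Int) then m else 0) (by split <;> omega)]
    cases k
    · simp only [Bool.false_eq_true, false_and, if_false]
      have := pv_gcfold_ge xs 0
      omega
    · simp only [true_and]
      split <;> split <;> omega

theorem pvMaxL_cons (n : Int) (l : List Int) (hn : 0 ≤ n) :
    pvMaxL (n :: l) = max n (pvMaxL l) := by
  unfold pvMaxL
  simp only [List.foldl_cons]
  rw [pv_foldmax_shift _ _ (by split <;> omega)]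
  split <;> omega

theorem pvGcMaxL_cons_true (n : Int) (rs : List (Bool × Int)) (hn : 0 ≤ n) :
    pvGcMaxL ((true, n) :: rs) = max n (pvGcMaxL rs) := by
  unfold pvGcMaxL
  simp only [List.foldl_cons]
  rw [pv_gcfold_shift _ _ (by split <;> omega)]
  simp only [true_and]
  split <;> omega

theorem pvGcMaxL_cons_false (n : Int) (rs : List (Bool × Int)) :
    pvGcMaxL ((false, n) :: rs) = pvGcMaxL rs := by
  unfold pvGcMaxL
  simp

theorem pvMaxL_nonneg (l : List Int) : 0 ≤ pvMaxL l := pv_foldmax_ge l 0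

theorem pvGcMaxL_nonneg (rs : List (Bool × Int)) : 0 ≤ pvGcMaxL rs := pv_gcfold_ge rs 0

theorem pv_hp_main (l : List Char) (c : Char) (hp lhp : Int) :
    (if (l.foldl pvHpStep (some c, hp, lhp)).2.1 > (l.foldl pvHpStep (some c, hp, lhp)).2.2
      then (l.foldl pvHpStep (some c, hp, lhp)).2.1
      else (l.foldl pvHpStep (some c, hp, lhp)).2.2) = max lhp (pvMaxRuns c hp l) := by
  induction l generalizing c hp lhp with
  | nil => simp only [List.foldl_nil, pvMaxRuns]; split <;> omega
  | cons x xs ih =>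
    rw [List.foldl_cons]
    by_cases hx : x = c
    · subst hx
      have hstep : pvHpStep (some x, hp, lhp) x = (some x, hp + 1, lhp) := by
        simp [pvHpStep]
      rw [hstep, pvMaxRuns]
      simp only [beq_self_eq_true, if_true]
      exact ih x (hp + 1) lhp
    · have hstep : pvHpStep (some c, hp, lhp) x = (some x, 1, if hp > lhp then hp else lhp) := by
        simp only [pvHpStep, beq_iff_eq, Option.some.injEq]
        rw [if_neg (Ne.symm hx), if_neg (Ne.symm hx)]
      rw [hstep, pvMaxRuns]
      simp only [beq_iff_eq, if_neg hx]
      rw [ih x 1 (if hp > lhp then hp else lhp)]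
      split <;> omega

theorem pv_gc_main (l : List Char) (gc lgc : Int) :
    (if (l.foldl pvGcStep (gc, lgc)).1 > (l.foldl pvGcStep (gc, lgc)).2
      then (l.foldl pvGcStep (gc, lgc)).1
      else (l.foldl pvGcStep (gc, lgc)).2) = max lgc (pvGcM gc l) := by
  induction l generalizing gc lgc with
  | nil => simp only [List.foldl_nil, pvGcM]; split <;> omega
  | cons x xs ih =>
    rw [List.foldl_cons]
    by_cases hx : pvGC x
    · have hstep : pvGcStep (gc, lgc) x = (gc + 1, lgc) := by
        simp [pvGcStep, hx]
      rw [hstep, pvGcM, if_pos hx]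
      exact ih (gc + 1) lgc
    · have hstep : pvGcStep (gc, lgc) x = (0, if gc > lgc then gc else lgc) := by
        simp [pvGcStep, hx]
      rw [hstep, pvGcM, if_neg hx]
      rw [ih 0 (if gc > lgc then gc else lgc)]
      split <;> omega

theorem pv_maxRuns_pos (l : List Char) (c : Char) (hp : Int) : hp ≤ pvMaxRuns c hp l := by
  induction l generalizing c hp with
  | nil => simp [pvMaxRuns]
  | cons x xs ih =>
    rw [pvMaxRuns]
    split
    · exact le_trans (by omega) (ih c (hp + 1))
    · omega

theorem pv_gcM_pos (l : List Char) (gc : Int) (h : 0 ≤ gc) : 0 ≤ pvGcM gc l := by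
  induction l generalizing gc with
  | nil => simpa [pvGcM]
  | cons x xs ih =>
    rw [pvGcM]
    split
    · exact ih (gc + 1) (by omega)
    · have := ih 0 le_rfl; omega

theorem pv_maxRuns_eq (l : List Char) (c : Char) (hp : Int) (h : 1 ≤ hp) :
    pvMaxRuns c hp l =
      max (hp + ((l.takeWhile (fun d => d == c)).length : Int))
          (pvMaxL (pvHpRunsL (l.dropWhile (fun d => d == c)))) := by
  induction l generalizing c hp with
  | nil => simp [pvMaxRuns, pvHpRunsL, pvMaxL]; omega
  | cons x xs ih =>
    rw [pvMaxRuns, List.takeWhile_cons, List.dropWhile_cons]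
    by_cases hx : (x == c : Bool)
    · simp only [hx, if_true, List.length_cons]
      rw [ih c (hp + 1) (by omega)]
      push_cast
      omega
    · simp only [hx, Bool.false_eq_true, if_false]
      rw [pvHpRunsL, pvMaxL_cons _ _ (by positivity), ih x 1 le_rfl]
      simp only [List.length_nil]
      have := pvMaxL_nonneg (pvHpRunsL (xs.dropWhile (fun d => d == x)))
      have h2 : (0 : Int) ≤ ((xs.takeWhile (fun d => d == x)).length : Int) := by positivity
      omega

theorem pv_Q_cons_false (x : Char) (xs : List Char) (hx : pvGC x = false) :
    pvGcMaxL (pvGcRunsL (x :: xs)) =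
      pvGcMaxL (pvGcRunsL (xs.dropWhile (fun d => pvGC d == false))) := by
  rw [pvGcRunsL, hx, pvGcMaxL_cons_false]

theorem pv_gc_struct (l : List Char) :
    (∀ gc : Int, 0 ≤ gc →
        pvGcM gc l =
          max (gc + ((l.takeWhile (fun d => pvGC d)).length : Int))
              (pvGcMaxL (pvGcRunsL (l.dropWhile (fun d => pvGC d))))) ∧
      pvGcM 0 l = pvGcMaxL (pvGcRunsL l) := by
  induction l with
  | nil =>
    constructor
    · intro gc hgc
      simp [pvGcM, pvGcRunsL, pvGcMaxL]
      omega
    · simp [pvGcM, pvGcRunsL, pvGcMaxL]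
  | cons x xs ih =>
    obtain ⟨ih1, ih2⟩ := ih
    by_cases hx : pvGC x
    · have main : ∀ gc : Int, 0 ≤ gc →
          pvGcM gc (x :: xs) =
            max (gc + (((x :: xs).takeWhile (fun d => pvGC d)).length : Int))
                (pvGcMaxL (pvGcRunsL ((x :: xs).dropWhile (fun d => pvGC d)))) := by
        intro gc hgc
        rw [pvGcM, if_pos hx, List.takeWhile_cons, List.dropWhile_cons]
        simp only [hx, if_true, List.length_cons]
        rw [ih1 (gc + 1) (by omega)]
        push_cast
        omega
      refine ⟨main, ?_⟩
      rw [main 0 le_rfl]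
      rw [List.takeWhile_cons, List.dropWhile_cons]
      simp only [hx, if_true, List.length_cons]
      rw [pvGcRunsL, hx, pvGcMaxL_cons_true _ _ (by positivity)]
      have hpred : (fun d => pvGC d == true) = (fun d => pvGC d) := by
        funext d; simp
      rw [hpred]
      have := pvGcMaxL_nonneg (pvGcRunsL (xs.dropWhile (fun d => pvGC d)))
      have h2 : (0 : Int) ≤ ((xs.takeWhile (fun d => pvGC d)).length : Int) := by positivity
      omega
    · have hx' : pvGC x = false := by simpa using hx
      have hQ : pvGcMaxL (pvGcRunsL (x :: xs)) = pvGcMaxL (pvGcRunsL xs) := by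
        rw [pv_Q_cons_false x xs hx']
        cases xs with
        | nil => rfl
        | cons y ys =>
          rw [List.dropWhile_cons]
          by_cases hy : pvGC y
          · simp [hy]
          · have hy' : pvGC y = false := by simpa using hy
            simp only [hy', beq_self_eq_true, if_true]
            rw [pv_Q_cons_false y ys hy']
      constructor
      · intro gc hgc
        rw [pvGcM, if_neg hx, List.takeWhile_cons, List.dropWhile_cons]
        simp only [hx', Bool.false_eq_true, if_false, List.length_nil]
        rw [ih2, hQ]
        have := pvGcMaxL_nonneg (pvGcRunsL xs)
        omega
      · rw [pvGcM, if_neg hx, hQ, ih2]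
        have := pvGcMaxL_nonneg (pvGcRunsL xs)
        omega

-- ===== VERDICT (by name: the statement is the Claim_ definition above) =====
theorem longest_hp_gc_len_spec : Claim_equal_longest_hp_gc_len := by
  unfold Claim_equal_longest_hp_gc_len
  intro seq _
  unfold Spec_longest_hp_gc_len longest_hp_gc_len longest_hp_gc_len_alt
  dsimp only
  rw [pv_fold_split, pvRunsHP_eq, pvRunsGC_eq, List.drop_zero]
  refine Prod.ext ?_ ?_
  · -- hp component
    dsimp only
    cases hl : seq.toList with
    | nil => simp [pvHpRunsL]
    | cons c xs =>
      rw [List.foldl_cons]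
      have hstep : pvHpStep (none, 0, 0) c = (some c, 1, 0) := by
        simp [pvHpStep]
      rw [hstep]
      rw [pv_hp_main xs c 1 0]
      have hB : pvMaxL (pvHpRunsL (c :: xs)) = pvMaxRuns c 1 xs := by
        rw [pvHpRunsL, pvMaxL_cons _ _ (by positivity),
            pv_maxRuns_eq xs c 1 le_rfl]
      unfold pvMaxL at hB
      rw [hB]
      have hpos := pv_maxRuns_pos xs c 1
      omega
  · -- gc component
    dsimp only
    rw [pv_gc_main seq.toList 0 0]
    have hB := (pv_gc_struct seq.toList).2
    unfold pvGcMaxL at hB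
    rw [← hB]
    have hpos := pv_gcM_pos seq.toList 0 le_rfl
    omega
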